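-- pv_equiv track=rewrite | github.com/renegat96/chess-vision | crop.py | shrink_blanks
-- ===== SOURCE A (Python) =====
-- def shrink_blanks(fen):
--     if '_' not in fen:
--         return fen
--     new_fen = ''
--     blanks = 0
--     for char in fen:
--         if char == '_':
--             blanks += 1
--         else:
--             if blanks != 0:
--                 new_fen += str(blanks)
--                 blanks = 0
--             new_fen += char
--     if blanks != 0:
--         new_fen += str(blanks)
--     return new_fen
-- ===== SOURCE B (Python) =====
-- def shrink_blanks(fen):
--     out = []
--     i = 0
--     n = len(fen)
--     while i < n:
--         if fen[i] == '_':
--             j = i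
--             while j < n and fen[j] == '_':
--                 j += 1
--             out.append(str(j - i))
--             i = j
--         else:
--             out.append(fen[i])
--             i += 1
--     return ''.join(out)
-- ===== Notes on version B (the rewrite author's own statement) =====
-- stated objective: alternative
-- what changed: Replaces the incremental blank-counter loop with string-concatenation accumulator by a two-pointer run scanner that skips each underscore run with an inner loop, emits its length, and joins collected pieces at the end.
import Mathlib
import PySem

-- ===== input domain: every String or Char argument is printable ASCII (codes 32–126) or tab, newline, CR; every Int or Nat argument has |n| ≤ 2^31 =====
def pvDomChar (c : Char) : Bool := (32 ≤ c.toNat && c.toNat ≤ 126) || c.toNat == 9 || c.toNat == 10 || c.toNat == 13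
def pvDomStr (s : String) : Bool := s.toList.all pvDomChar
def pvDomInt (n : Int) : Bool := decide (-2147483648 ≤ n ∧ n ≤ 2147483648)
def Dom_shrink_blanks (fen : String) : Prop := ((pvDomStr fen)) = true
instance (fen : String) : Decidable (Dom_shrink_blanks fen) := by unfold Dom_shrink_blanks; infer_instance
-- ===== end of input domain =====

-- B replaces A's incremental blank-counter loop by a two-pointer run scanner (inner loop skips each
-- underscore run and emits its length); same O(n) cost, alternative structure.

-- ===== PORT A =====
-- the for-loop of A over the characters, carrying (new_fen, blanks)
def shrinkA_loop : List Char → List Char → Nat → List Char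
  | [], acc, blanks => if blanks ≠ 0 then acc ++ PySem.Int.toChars blanks else acc
  | c :: cs, acc, blanks =>
    if c = '_' then shrinkA_loop cs acc (blanks + 1)
    else shrinkA_loop cs ((if blanks ≠ 0 then acc ++ PySem.Int.toChars blanks else acc) ++ [c]) 0

def shrink_blanks (fen : String) : String :=
  if PySem.Str.isIn "_" fen = false then fen
  else String.ofList (shrinkA_loop fen.toList [] 0)

-- ===== PORT B =====
-- B's outer while over positions: on '_' the inner while (takeWhile/dropWhile) skips the run
def shrinkB_go : List Char → List Char
  | [] => []
  | c :: cs =>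
    if c = '_' then
      PySem.Int.toChars (((cs.takeWhile (· == '_')).length : Int) + 1)
        ++ shrinkB_go (cs.dropWhile (· == '_'))
    else c :: shrinkB_go cs
termination_by l => l.length
decreasing_by
  · exact Nat.lt_succ_of_le (List.length_dropWhile_le _ _)
  · simp

def shrink_blanks_alt (fen : String) : String := String.ofList (shrinkB_go fen.toList)

-- ===== PRECONDITION & SPEC =====
def Spec_shrink_blanks (fen : String) (out : String) : Prop := out = shrink_blanks_alt fen
instance (fen : String) (out : String) : Decidable (Spec_shrink_blanks fen out) := by unfold Spec_shrink_blanks; infer_instance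

-- ===== CLAIM (what is proved, stated in full; the proofs are below) =====
def Claim_equal_shrink_blanks : Prop := ∀ (fen : String), Dom_shrink_blanks fen → Spec_shrink_blanks fen (shrink_blanks fen)

-- ===== LEMMAS AND PROOFS =====

-- takeWhile/dropWhile past a block of underscores
theorem tw_dw_repl (k : Nat) (r : List Char) :
    (List.replicate k '_' ++ r).takeWhile (· == '_') = List.replicate k '_' ++ r.takeWhile (· == '_') ∧
    (List.replicate k '_' ++ r).dropWhile (· == '_') = r.dropWhile (· == '_') := by
  induction k with
  | zero => simp
  | succ k ih => simp [List.replicate_succ, ih.1, ih.2]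

theorem shrinkB_go_repl_cons (k : Nat) (c : Char) (cs : List Char) (hc : ¬ c = '_') :
    shrinkB_go (List.replicate (k + 1) '_' ++ c :: cs) =
      PySem.Int.toChars ((k : Int) + 1) ++ c :: shrinkB_go cs := by
  rw [List.replicate_succ, List.cons_append, shrinkB_go]
  have h := tw_dw_repl k (c :: cs)
  simp only [List.takeWhile_cons, List.dropWhile_cons] at h
  rw [h.1, h.2]
  simp [hc, shrinkB_go]

theorem shrinkB_go_repl (k : Nat) :
    shrinkB_go (List.replicate (k + 1) '_') = PySem.Int.toChars ((k : Int) + 1) := by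
  rw [List.replicate_succ, shrinkB_go]
  have h := tw_dw_repl k ([] : List Char)
  simp only [List.append_nil] at h
  simp [h.1, h.2, shrinkB_go]

-- A's loop with b pending blanks computes acc ++ B's scan of (b underscores ++ rest)
theorem loop_eq (cs : List Char) : ∀ (acc : List Char) (b : Nat),
    shrinkA_loop cs acc b = acc ++ shrinkB_go (List.replicate b '_' ++ cs) := by
  induction cs with
  | nil =>
    intro acc b
    cases b with
    | zero => simp [shrinkA_loop, shrinkB_go]
    | succ k => simp [shrinkA_loop, shrinkB_go_repl]
  | cons c cs ih =>
    intro acc b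
    by_cases hc : c = '_'
    · subst hc
      rw [shrinkA_loop]
      simp only [ih]
      rw [show List.replicate b '_' ++ '_' :: cs = List.replicate (b + 1) '_' ++ cs by
        rw [List.replicate_succ', List.append_assoc]; rfl]
      simp
    · rw [shrinkA_loop, if_neg hc, ih]
      cases b with
      | zero => simp [shrinkB_go, hc]
      | succ k => simp [shrinkB_go_repl_cons k c cs hc]

theorem shrinkB_go_no_blank (l : List Char) (h : '_' ∉ l) : shrinkB_go l = l := by
  induction l with
  | nil => simp [shrinkB_go]
  | cons c cs ih =>
    have hc : ¬ c = '_' := fun e => h (e ▸ List.mem_cons_self ..)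
    rw [shrinkB_go, if_neg hc, ih (fun hm => h (List.mem_cons_of_mem _ hm))]

-- ===== VERDICT (by name: the statement is the Claim_ definition above) =====
theorem shrink_blanks_spec : Claim_equal_shrink_blanks := by
  intro fen _
  unfold Spec_shrink_blanks shrink_blanks shrink_blanks_alt
  split
  · next hno =>
    have hmem : '_' ∉ fen.toList := by
      intro hm
      obtain ⟨s, t, heq⟩ := List.append_of_mem hm
      have : PySem.Str.isIn "_" fen = true := by
        rw [PySem.Str.isIn_iff_infix]
        exact ⟨s, t, by rw [heq]; simp⟩
      rw [this] at hno
      exact Bool.noConfusion hno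
    rw [shrinkB_go_no_blank _ hmem]
    exact String.ofList_toList.symm
  · rw [loop_eq]
    simp
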